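-- pv_equiv track=rewrite | github.com/RaphaelRoriz/bandwith_reduction_framework | bandwidth_reductor.py | larguraBanda
-- ===== SOURCE A (Python) =====
-- def larguraBanda(matrizBase):
-- 	#Atributos
-- 	tamanho = len(matrizBase)
-- 	#Largura atual
-- 	largura = 0
-- 	#Índices
-- 	i = 0
-- 	j = 1
--
--
-- 	diagonal = 1
-- 	while(diagonal < tamanho):
-- 		i = 0
-- 		j = diagonal
-- 		continua = True
-- 		while(j < tamanho and continua):
-- 			elemento = matrizBase[i][j]
-- 			if(elemento != 0):
-- 				largura = diagonal
-- 				continua = False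
-- 			i += 1
-- 			j += 1
-- 		diagonal += 1
--
-- 	return largura
-- ===== SOURCE B (Python) =====
-- def larguraBanda(matrizBase):
--     n = len(matrizBase)
--     largura = 0
--     for i in range(n):
--         linha = matrizBase[i]
--         for j in range(i + 1, n):
--             if linha[j] != 0 and j - i > largura:
--                 largura = j - i
--     return largura
-- ===== Notes on version B (the rewrite author's own statement) =====
-- stated objective: simpler
-- what changed: Replaces the diagonal-by-diagonal scan with early exit and overwrite by a single row-wise pass over the strict upper triangle that maintains a running maximum of j-i over nonzero entries.
-- outside the precondition, e.g. on larguraBanda([[1, 2, 3], [0, 1], [0, 0, 1]]): A returns 2, B raises IndexError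
import Mathlib
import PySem

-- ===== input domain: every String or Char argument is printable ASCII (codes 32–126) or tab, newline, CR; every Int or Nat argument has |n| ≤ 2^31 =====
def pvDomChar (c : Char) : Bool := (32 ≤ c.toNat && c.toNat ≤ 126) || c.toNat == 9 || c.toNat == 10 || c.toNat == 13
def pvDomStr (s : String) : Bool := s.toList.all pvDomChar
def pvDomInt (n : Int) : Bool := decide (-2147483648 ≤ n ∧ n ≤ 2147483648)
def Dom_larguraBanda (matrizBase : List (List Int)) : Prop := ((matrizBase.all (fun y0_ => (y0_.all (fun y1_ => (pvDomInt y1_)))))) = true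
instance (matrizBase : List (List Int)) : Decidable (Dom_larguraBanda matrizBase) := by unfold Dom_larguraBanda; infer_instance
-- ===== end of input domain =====

-- B replaces A's diagonal-by-diagonal scan (with early exit and overwrite) by one row-wise
-- pass over the strict upper triangle maintaining a running maximum of j - i (objective: simpler).

-- ===== PORT A =====
-- inner while loop of A: state (i, j, largura, continua); `fuel` is only the totality
-- guard ((tamanho - j).toNat iterations remain, exactly the loop's trip count).
-- matrizBase[i][j] is ported as pyGetD∘pyGetD, exact on Pre_ (indices in range there).
def larguraBandaInner (m : List (List Int)) (tamanho : Int) :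
    Nat → Int → Int → Int → Int → Bool → Int
  | 0, _, _, _, largura, _ => largura
  | fuel + 1, diagonal, i, j, largura, continua =>
    if j < tamanho ∧ continua = true then
      let elemento := PySem.List.pyGetD (PySem.List.pyGetD m i []) j 0
      if elemento ≠ 0 then
        larguraBandaInner m tamanho fuel diagonal (i + 1) (j + 1) diagonal false
      else
        larguraBandaInner m tamanho fuel diagonal (i + 1) (j + 1) largura continua
    else largura

def larguraBanda (matrizBase : List (List Int)) : Int :=
  let tamanho : Int := matrizBase.length
  (PySem.List.pyRange 1 tamanho 1).foldl
    (fun largura diagonal =>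
      larguraBandaInner matrizBase tamanho (tamanho - diagonal).toNat diagonal 0 diagonal largura true)
    0

-- ===== PORT B =====
def larguraBanda_alt (matrizBase : List (List Int)) : Int :=
  let n : Int := matrizBase.length
  (PySem.List.pyRange 0 n 1).foldl
    (fun largura i =>
      let linha := PySem.List.pyGetD matrizBase i []
      (PySem.List.pyRange (i + 1) n 1).foldl
        (fun largura j =>
          if PySem.List.pyGetD linha j 0 ≠ 0 ∧ j - i > largura then j - i else largura)
        largura)
    0

-- ===== PRECONDITION & SPEC =====
-- Pre_ excludes ragged matrices (a non-last row shorter than the matrix): there the Python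
-- programs index out of range — A raises IndexError unless its early exit happens to skip the
-- short cell that B's full pass always visits, so only fully wide rows are claimed.
def Pre_larguraBanda (matrizBase : List (List Int)) : Prop :=
  ∀ row ∈ matrizBase.dropLast, (matrizBase.length : Int) ≤ row.length
instance (matrizBase : List (List Int)) : Decidable (Pre_larguraBanda matrizBase) := by
  unfold Pre_larguraBanda; infer_instance
def pvWitness_larguraBanda : List (List Int) := [[1, 2], [0, 1]]

def Spec_larguraBanda (matrizBase : List (List Int)) (out : Int) : Prop := out = larguraBanda_alt matrizBase
instance (matrizBase : List (List Int)) (out : Int) : Decidable (Spec_larguraBanda matrizBase out) := by unfold Spec_larguraBanda; infer_instance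

-- ===== CLAIM (what is proved, stated in full; the proofs are below) =====
def Claim_equal_larguraBanda : Prop := ∀ (matrizBase : List (List Int)), Dom_larguraBanda matrizBase → Pre_larguraBanda matrizBase → Spec_larguraBanda matrizBase (larguraBanda matrizBase)

-- ===== LEMMAS AND PROOFS =====

-- the entry both ports read (with pyGetD's defaults)
def ent (m : List (List Int)) (i j : Int) : Int :=
  PySem.List.pyGetD (PySem.List.pyGetD m i []) j 0

-- diagonal d has a nonzero entry
def Hit (m : List (List Int)) (n d : Int) : Prop :=
  ∃ t : Nat, d + (t : Int) < n ∧ ent m t (d + t) ≠ 0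

def Astep (m : List (List Int)) (n l d : Int) : Int :=
  larguraBandaInner m n (n - d).toNat d 0 d l true

def Bin (m : List (List Int)) (n i l : Int) : Int :=
  (PySem.List.pyRange (i + 1) n 1).foldl
    (fun l j => if ent m i j ≠ 0 ∧ j - i > l then j - i else l) l

lemma inner_false (m : List (List Int)) (n : Int) (fuel : Nat) (d i j l : Int) :
    larguraBandaInner m n fuel d i j l false = l := by
  cases fuel <;> simp [larguraBandaInner]

lemma inner_hit (m : List (List Int)) (n : Int) (fuel : Nat) :
    ∀ i j l d : Int, fuel = (n - j).toNat →
    (∃ t : Nat, j + (t : Int) < n ∧ ent m (i + t) (j + t) ≠ 0) →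
    larguraBandaInner m n fuel d i j l true = d := by
  induction fuel with
  | zero =>
    rintro i j l d hf ⟨t, ht, he⟩
    exfalso; omega
  | succ fuel ih =>
    rintro i j l d hf ⟨t, ht, he⟩
    have hjn : j < n := by omega
    unfold larguraBandaInner
    rw [if_pos (show j < n ∧ true = true from ⟨hjn, rfl⟩)]
    show (if PySem.List.pyGetD (PySem.List.pyGetD m i []) j 0 ≠ 0 then
        larguraBandaInner m n fuel d (i + 1) (j + 1) d false
      else larguraBandaInner m n fuel d (i + 1) (j + 1) l true) = d
    split_ifs with h0
    · exact inner_false m n fuel d (i + 1) (j + 1) d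
    · have ht0 : t ≠ 0 := by
        rintro rfl
        apply h0
        have : ent m (i + ((0 : Nat) : Int)) (j + ((0 : Nat) : Int)) ≠ 0 := he
        simpa [ent] using this
      obtain ⟨t', rfl⟩ : ∃ t', t = t' + 1 := ⟨t - 1, by omega⟩
      apply ih (i + 1) (j + 1) l d (by omega)
      refine ⟨t', by push_cast; push_cast at ht; omega, ?_⟩
      have : i + 1 + (t' : Int) = i + ((t' + 1 : Nat) : Int) := by push_cast; ring
      rw [this]
      have : j + 1 + (t' : Int) = j + ((t' + 1 : Nat) : Int) := by push_cast; ring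
      rw [this]
      exact he

lemma inner_nohit (m : List (List Int)) (n : Int) (fuel : Nat) :
    ∀ i j l d : Int, fuel = (n - j).toNat →
    (¬ ∃ t : Nat, j + (t : Int) < n ∧ ent m (i + t) (j + t) ≠ 0) →
    larguraBandaInner m n fuel d i j l true = l := by
  induction fuel with
  | zero => intro i j l d hf hne; rfl
  | succ fuel ih =>
    intro i j l d hf hne
    have hjn : j < n := by omega
    unfold larguraBandaInner
    rw [if_pos (show j < n ∧ true = true from ⟨hjn, rfl⟩)]
    show (if PySem.List.pyGetD (PySem.List.pyGetD m i []) j 0 ≠ 0 then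
        larguraBandaInner m n fuel d (i + 1) (j + 1) d false
      else larguraBandaInner m n fuel d (i + 1) (j + 1) l true) = l
    split_ifs with h0
    · exact absurd ⟨0, by simpa [ent] using And.intro (by omega : j + ((0:Nat):Int) < n) h0⟩ hne
    · apply ih (i + 1) (j + 1) l d (by omega)
      rintro ⟨t', ht', he'⟩
      apply hne
      refine ⟨t' + 1, by push_cast; push_cast at ht'; omega, ?_⟩
      have e1 : i + ((t' + 1 : Nat) : Int) = i + 1 + (t' : Int) := by push_cast; ring
      have e2 : j + ((t' + 1 : Nat) : Int) = j + 1 + (t' : Int) := by push_cast; ring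
      rw [e1, e2]
      exact he' 

lemma Astep_of_hit (m : List (List Int)) (n l d : Int) (h : Hit m n d) : Astep m n l d = d := by
  obtain ⟨t, ht, he⟩ := h
  exact inner_hit m n (n - d).toNat 0 d l d rfl ⟨t, ht, by simpa using he⟩

lemma Astep_of_not_hit (m : List (List Int)) (n l d : Int) (h : ¬ Hit m n d) : Astep m n l d = l := by
  apply inner_nohit m n (n - d).toNat 0 d l d rfl
  rintro ⟨t, ht, he⟩
  exact h ⟨t, ht, by simpa using he⟩

def Afold (m : List (List Int)) (n : Int) (k : Nat) : Int :=
  (PySem.List.pyRange 1 (1 + (k : Int)) 1).foldl (Astep m n) 0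

def Binn (m : List (List Int)) (i : Int) (k : Nat) (l : Int) : Int :=
  (PySem.List.pyRange (i + 1) (i + 1 + (k : Int)) 1).foldl
    (fun l j => if ent m i j ≠ 0 ∧ j - i > l then j - i else l) l

def Bfold (m : List (List Int)) (n : Int) (k : Nat) : Int :=
  (PySem.List.pyRange 0 (k : Int) 1).foldl (fun l i => Bin m n i l) 0

lemma Afold_zero (m : List (List Int)) (n : Int) : Afold m n 0 = 0 := by
  simp [Afold, PySem.List.pyRange_one_eq_nil]

lemma Afold_succ (m : List (List Int)) (n : Int) (k : Nat) :
    Afold m n (k + 1) = Astep m n (Afold m n k) (1 + (k : Int)) := by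
  unfold Afold
  rw [show (1 : Int) + ((k + 1 : Nat) : Int) = (1 + (k : Int)) + 1 by push_cast; ring]
  rw [PySem.List.pyRange_one_succ_right (by omega), List.foldl_append]
  rfl

lemma Afold_facts (m : List (List Int)) (n : Int) (k : Nat) :
    0 ≤ Afold m n k ∧
    (Afold m n k = 0 ∨ (1 ≤ Afold m n k ∧ Afold m n k < 1 + (k : Int) ∧ Hit m n (Afold m n k))) ∧
    (∀ d : Int, 1 ≤ d → d < 1 + (k : Int) → Hit m n d → d ≤ Afold m n k) := by
  induction k with
  | zero =>
    refine ⟨by rw [Afold_zero], Or.inl (Afold_zero m n), ?_⟩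
    intro d h1 h2
    exfalso; omega
  | succ k ih =>
    obtain ⟨h0, hex, hub⟩ := ih
    rw [Afold_succ]
    by_cases hh : Hit m n (1 + (k : Int))
    · rw [Astep_of_hit m n _ _ hh]
      refine ⟨by omega, Or.inr ⟨by omega, by push_cast; omega, hh⟩, ?_⟩
      intro d h1 h2 _
      push_cast at h2 ⊢; omega
    · rw [Astep_of_not_hit m n _ _ hh]
      refine ⟨h0, ?_, ?_⟩
      · rcases hex with h | ⟨ha, hb, hc⟩
        · exact Or.inl h
        · exact Or.inr ⟨ha, by push_cast; omega, hc⟩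
      · intro d h1 h2 hd
        rcases (show d < 1 + (k : Int) ∨ d = 1 + (k : Int) by push_cast at h2; omega) with h | h
        · exact hub d h1 h hd
        · exact absurd (h ▸ hd) hh

lemma Binn_zero (m : List (List Int)) (i : Int) (l : Int) : Binn m i 0 l = l := by
  simp [Binn, PySem.List.pyRange_one_eq_nil]

lemma Binn_succ (m : List (List Int)) (i : Int) (k : Nat) (l : Int) :
    Binn m i (k + 1) l =
      (if ent m i (i + 1 + (k : Int)) ≠ 0 ∧ (i + 1 + (k : Int)) - i > Binn m i k l
        then (i + 1 + (k : Int)) - i else Binn m i k l) := by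
  unfold Binn
  rw [show i + 1 + ((k + 1 : Nat) : Int) = (i + 1 + (k : Int)) + 1 by push_cast; ring]
  rw [PySem.List.pyRange_one_succ_right (by omega), List.foldl_append]
  rfl

lemma Binn_facts (m : List (List Int)) (i : Int) (k : Nat) (l : Int) :
    l ≤ Binn m i k l ∧
    (Binn m i k l = l ∨ ∃ j : Int, i + 1 ≤ j ∧ j < i + 1 + (k : Int) ∧ ent m i j ≠ 0 ∧
      Binn m i k l = j - i) ∧
    (∀ j : Int, i + 1 ≤ j → j < i + 1 + (k : Int) → ent m i j ≠ 0 → j - i ≤ Binn m i k l) := by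
  induction k with
  | zero =>
    refine ⟨by rw [Binn_zero], Or.inl (Binn_zero m i l), ?_⟩
    intro j h1 h2; exfalso; omega
  | succ k ih =>
    obtain ⟨h0, hex, hub⟩ := ih
    rw [Binn_succ]
    split_ifs with hc
    · refine ⟨by omega, Or.inr ⟨i + 1 + (k : Int), by omega, by push_cast; omega, hc.1, by ring⟩, ?_⟩
      intro j h1 h2 hj
      push_cast at h2; omega
    · refine ⟨h0, ?_, ?_⟩
      · rcases hex with h | ⟨j, ha, hb, hcj, hd⟩
        · exact Or.inl h
        · exact Or.inr ⟨j, ha, by push_cast; omega, hcj, hd⟩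
      · intro j h1 h2 hj
        rcases (show j < i + 1 + (k : Int) ∨ j = i + 1 + (k : Int) by push_cast at h2; omega) with h | h
        · exact hub j h1 h hj
        · subst h
          rcases not_and_or.mp hc with h | h
        -- ¬¬(ent = 0) contradicts hj, or the max already dominates
          · exact absurd hj h
          · omega

lemma Bin_eq_Binn (m : List (List Int)) (n i l : Int) (h : i + 1 ≤ n) :
    Bin m n i l = Binn m i (n - (i + 1)).toNat l := by
  unfold Bin Binn
  rw [show i + 1 + (((n - (i + 1)).toNat : Nat) : Int) = n by omega]

lemma Bfold_zero (m : List (List Int)) (n : Int) : Bfold m n 0 = 0 := by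
  simp [Bfold, PySem.List.pyRange_one_eq_nil]

lemma Bfold_succ (m : List (List Int)) (n : Int) (k : Nat) :
    Bfold m n (k + 1) = Bin m n (k : Int) (Bfold m n k) := by
  unfold Bfold
  rw [show ((k + 1 : Nat) : Int) = (k : Int) + 1 by push_cast; ring]
  rw [PySem.List.pyRange_one_succ_right (by omega), List.foldl_append]
  rfl

lemma Bfold_facts (m : List (List Int)) (n : Int) (k : Nat) (hk : (k : Int) ≤ n) :
    0 ≤ Bfold m n k ∧
    (Bfold m n k = 0 ∨ ∃ i j : Int, 0 ≤ i ∧ i < j ∧ j < n ∧ ent m i j ≠ 0 ∧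
      Bfold m n k = j - i) ∧
    (∀ i j : Int, 0 ≤ i → i < (k : Int) → i < j → j < n → ent m i j ≠ 0 →
      j - i ≤ Bfold m n k) := by
  induction k with
  | zero =>
    refine ⟨by rw [Bfold_zero], Or.inl (Bfold_zero m n), ?_⟩
    intro i j h1 h2; exfalso; omega
  | succ k ih =>
    have hk' : (k : Int) ≤ n := by push_cast at hk; omega
    obtain ⟨h0, hex, hub⟩ := ih hk'
    have hkn : (k : Int) + 1 ≤ n := by push_cast at hk; omega
    rw [Bfold_succ, Bin_eq_Binn m n (k : Int) _ hkn]
    obtain ⟨i0, iex, iub⟩ := Binn_facts m (k : Int) (n - ((k : Int) + 1)).toNat (Bfold m n k)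
    have hend : (k : Int) + 1 + (((n - ((k : Int) + 1)).toNat : Nat) : Int) = n := by omega
    refine ⟨by omega, ?_, ?_⟩
    · rcases iex with h | ⟨j, ha, hb, hc, hd⟩
      · rw [h]
        rcases hex with h' | ⟨i, j, p1, p2, p3, p4, p5⟩
        · exact Or.inl h'
        · exact Or.inr ⟨i, j, p1, p2, p3, p4, p5⟩
      · exact Or.inr ⟨(k : Int), j, by omega, by omega, by omega, hc, hd⟩
    · intro i j p0 pik pij pjn pe
      rcases (show i < (k : Int) ∨ i = (k : Int) by push_cast at pik; omega) with h | h
      · exact le_trans (hub i j p0 h pij pjn pe) i0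
      · subst h
        exact iub j (by omega) (by omega) pe
  
lemma A_eq_fold (m : List (List Int)) :
    larguraBanda m = (PySem.List.pyRange 1 (m.length : Int) 1).foldl (Astep m (m.length : Int)) 0 := rfl

lemma B_eq_fold (m : List (List Int)) :
    larguraBanda_alt m = (PySem.List.pyRange 0 (m.length : Int) 1).foldl
      (fun l i => Bin m (m.length : Int) i l) 0 := rfl

-- ===== VERDICT (by name: the statement is the Claim_ definition above) =====
theorem larguraBanda_spec : Claim_equal_larguraBanda := by
  intro m _ _
  unfold Spec_larguraBanda
  by_cases hz : m.length = 0
  · rw [List.length_eq_zero_iff] at hz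
    subst hz
    rfl
  · have hn : 1 ≤ (m.length : Int) := by omega
    have hA : larguraBanda m = Afold m (m.length : Int) ((m.length : Int) - 1).toNat := by
      rw [A_eq_fold]; unfold Afold
      rw [show (1 : Int) + ((((m.length : Int) - 1).toNat : Nat) : Int) = (m.length : Int) by omega]
    have hB : larguraBanda_alt m = Bfold m (m.length : Int) m.length := by
      rw [B_eq_fold]; unfold Bfold; rfl
    obtain ⟨a0, aex, aub⟩ := Afold_facts m (m.length : Int) ((m.length : Int) - 1).toNat
    obtain ⟨b0, bex, bub⟩ := Bfold_facts m (m.length : Int) m.length (by omega)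
    have hcast : (1 : Int) + ((((m.length : Int) - 1).toNat : Nat) : Int) = (m.length : Int) := by omega
    rw [hA, hB]
    apply le_antisymm
    · rcases aex with h | ⟨h1, _, t, ht, he⟩
      · omega
      · have hb := bub (t : Int) (Afold m (m.length : Int) ((m.length : Int) - 1).toNat + (t : Int))
          (by omega) (by omega) (by omega) (by omega) he
        omega
    · rcases bex with h | ⟨i, j, p0, pij, pjn, pe, peq⟩
      · omega
      · have hhit : Hit m (m.length : Int) (j - i) := by
          refine ⟨i.toNat, by omega, ?_⟩
          rw [show ((i.toNat : Nat) : Int) = i by omega, show j - i + i = j by ring]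
          exact pe
        have ha := aub (j - i) (by omega) (by omega) hhit
        omega
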